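-- pv_equiv track=rewrite | github.com/YohansHailu/competitive_programming | daynamic_programing/minimumBuckets.py | minimumBuckets
-- ===== SOURCE A (Python) =====
-- def minimumBuckets(s: str) -> int:
--     s = list(s)
--     res = 0
--
--     for i in range(1, len(s)-1):
--         if s[i] != ".":
--             continue
--
--         if s[i-1] + s[i+1] == "HH":
--             res += 1
--             s[i-1:i+2]  = "???"
--
--     for i in range(len(s)):
--         if s[i] != ".":
--             continue
--
--         if i+1 < len(s) and s[i+1] == "H":
--             s[i+1] = "?"
--             res += 1
--
--         if i-1 >= 0 and s[i-1] == "H":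
--             s[i-1] = "?"
--             res += 1
--
--     for i in s:
--         if i == "H":
--             return -1
--
--     return res
-- ===== SOURCE B (Python) =====
-- def minimumBuckets(s: str) -> int:
--     # Phase 1: collapse each leftmost non-overlapping "H.H" into "???" (one shared bucket).
--     t = []
--     res = 0
--     i = 0
--     n = len(s)
--     while i < n:
--         if s[i] == 'H' and i + 2 < n and s[i + 1] == '.' and s[i + 2] == 'H':
--             t += '???'
--             res += 1
--             i += 3
--         else:
--             t.append(s[i])
--             i += 1
--     # Phase 2: every remaining house needs its own bucket in an adjacent empty cell.
--     for i, c in enumerate(t):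
--         if c == 'H':
--             if (i > 0 and t[i - 1] == '.') or (i + 1 < len(t) and t[i + 1] == '.'):
--                 res += 1
--             else:
--                 return -1
--     return res
-- ===== Notes on version B (the rewrite author's own statement) =====
-- stated objective: simpler
-- what changed: Replaces A's three index-mutating passes (in-place slice rewrite of each house-gap-house triple, per-dot marking of neighbouring houses, final scan for leftover houses) with a pure two-phase computation: one forward scan that collapses each leftmost non-overlapping house-gap-house triple while counting shared buckets, then one enumerate pass that charges each remaining house one bucket if it has an adjacent empty cell and returns -1 early otherwise; no list mutation or marker bookkeeping.
import Mathlib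
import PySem

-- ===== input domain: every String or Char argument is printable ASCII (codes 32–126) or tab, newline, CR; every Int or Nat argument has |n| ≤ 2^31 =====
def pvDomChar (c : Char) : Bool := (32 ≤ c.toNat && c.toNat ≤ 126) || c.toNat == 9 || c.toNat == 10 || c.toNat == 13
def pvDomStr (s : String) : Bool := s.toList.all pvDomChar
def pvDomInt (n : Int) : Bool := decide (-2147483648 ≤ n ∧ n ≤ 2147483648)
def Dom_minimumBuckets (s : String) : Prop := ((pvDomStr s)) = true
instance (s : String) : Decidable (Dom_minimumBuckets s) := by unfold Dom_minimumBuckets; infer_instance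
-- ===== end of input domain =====

-- B replaces A's three index-mutating passes with a pure two-phase scan (collapse "H.H" triples, then
-- charge each remaining H one adjacent bucket); objective: simpler, same O(n) cost.

-- ===== PORT A =====
-- pass 1 body: `if s[i] != ".": continue; if s[i-1]+s[i+1] == "HH": res += 1; s[i-1:i+2] = "???"`
-- (the concatenation test is both neighbours being 'H'; the slice assignment sets the three cells;
-- all indices are in range for every i the loop produces, so pyGetD/pySetD are exact here)
def pvStep1 (st : List Char × Int) (i : Int) : List Char × Int :=
  if PySem.List.pyGetD st.1 i ' ' ≠ '.' then st
  else if PySem.List.pyGetD st.1 (i - 1) ' ' = 'H' ∧ PySem.List.pyGetD st.1 (i + 1) ' ' = 'H' then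
    (PySem.List.pySetD (PySem.List.pySetD (PySem.List.pySetD st.1 (i - 1) '?') i '?') (i + 1) '?',
     st.2 + 1)
  else st

-- pass 2 body: mark s[i+1] then s[i-1] when they hold 'H' next to the '.' at i (Python's `i-1 >= 0` is `0 ≤ i - 1` on Int)
def pvStep2 (n : Int) (st : List Char × Int) (i : Int) : List Char × Int :=
  if PySem.List.pyGetD st.1 i ' ' ≠ '.' then st
  else
    let st1 := if i + 1 < n ∧ PySem.List.pyGetD st.1 (i + 1) ' ' = 'H'
      then (PySem.List.pySetD st.1 (i + 1) '?', st.2 + 1) else st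
    if 0 ≤ i - 1 ∧ PySem.List.pyGetD st1.1 (i - 1) ' ' = 'H'
      then (PySem.List.pySetD st1.1 (i - 1) '?', st1.2 + 1) else st1

-- pass 3: `for i in s: if i == "H": return -1` then `return res`
def pvPass3 (res : Int) : List Char → Int
  | [] => res
  | c :: cs => if c = 'H' then -1 else pvPass3 res cs

def minimumBuckets (s : String) : Int :=
  let l := s.toList
  let n : Int := l.length
  let st := (PySem.List.pyRange 1 (n - 1) 1).foldl pvStep1 (l, 0)
  let st2 := (PySem.List.pyRange 0 n 1).foldl (pvStep2 n) st
  pvPass3 st2.2 st2.1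

-- ===== PORT B =====
-- phase-1 while loop of Source B: the index i walks forward consuming 3 cells on an "H.H" match and 1
-- otherwise; ported as the obvious structural recursion on the unscanned suffix s[i:], with the
-- Python guard `s[i]=='H' and i+2<n and s[i+1]=='.' and s[i+2]=='H'` becoming shape + char tests
def pvBuild : List Char → List Char × Int
  | [] => ([], 0)
  | [c] => ([c], 0)
  | [c, d] => ([c, d], 0)
  | c :: d :: e :: r =>
    if c = 'H' ∧ d = '.' ∧ e = 'H' then
      let br := pvBuild r
      ('?' :: '?' :: '?' :: br.1, br.2 + 1)
    else
      let br := pvBuild (d :: e :: r)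
      (c :: br.1, br.2)

-- phase-2 enumerate loop of Source B: t[i-1] is carried as `prev` (sentinel '#' plays the role of the
-- false `i > 0` guard at i = 0), t[i+1] is cs.head?; the `return -1` is the early exit
def pvCharge (prev : Char) (res : Int) : List Char → Int
  | [] => res
  | c :: cs =>
    if c = 'H' then
      if prev = '.' ∨ cs.head? = some '.' then pvCharge c (res + 1) cs else -1
    else pvCharge c res cs

def minimumBuckets_alt (s : String) : Int :=
  let br := pvBuild s.toList
  pvCharge '#' br.2 br.1

-- ===== PRECONDITION & SPEC =====
def Spec_minimumBuckets (s : String) (out : Int) : Prop := out = minimumBuckets_alt s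
instance (s : String) (out : Int) : Decidable (Spec_minimumBuckets s out) := by unfold Spec_minimumBuckets; infer_instance

-- ===== CLAIM (what is proved, stated in full; the proofs are below) =====
def Claim_equal_minimumBuckets : Prop := ∀ (s : String), Dom_minimumBuckets s → Spec_minimumBuckets s (minimumBuckets s)

-- ===== LEMMAS AND PROOFS =====

lemma pvGetAt (pre d : List Char) (k : Nat) (i : Int) (h : i = pre.length + k) (c : Char) :
    PySem.List.pyGetD (pre ++ d) i c = d.getD k c := by
  have h2 : i = ((pre.length + k : Nat) : Int) := by push_cast; omega
  rw [h2, PySem.List.pyGetD_natCast]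
  simp [List.getD_eq_getElem?_getD, List.getElem?_append_right (by omega : pre.length ≤ pre.length + k)]

lemma pvSetAt (pre d : List Char) (k : Nat) (i : Int) (h : i = pre.length + k) (x : Char) :
    PySem.List.pySetD (pre ++ d) i x = pre ++ d.set k x := by
  have h2 : i = ((pre.length + k : Nat) : Int) := by push_cast; omega
  rw [h2, PySem.List.pySetD_natCast]
  simp

lemma pvBuild_cons_ne (c : Char) (hc : c ≠ 'H') (r : List Char) :
    pvBuild (c :: r) = (c :: (pvBuild r).1, (pvBuild r).2) := by
  match r with
  | [] => simp [pvBuild]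
  | [x] => simp [pvBuild]
  | x :: y :: r2 => simp only [pvBuild]; rw [if_neg (by simp [hc])]

lemma pvBuild_nomatch (c0 c1 c2 : Char) (r : List Char) (h : ¬(c0 = 'H' ∧ c1 = '.' ∧ c2 = 'H')) :
    pvBuild (c0 :: c1 :: c2 :: r) = (c0 :: (pvBuild (c1 :: c2 :: r)).1, (pvBuild (c1 :: c2 :: r)).2) := by
  simp only [pvBuild]; rw [if_neg h]

lemma pvBuild_match (r : List Char) :
    pvBuild ('H' :: '.' :: 'H' :: r) = ('?' :: '?' :: '?' :: (pvBuild r).1, (pvBuild r).2 + 1) := by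
  simp only [pvBuild]; rw [if_pos (by decide)]

lemma pass1_fold (N : Nat) : ∀ (d : List Char), d.length ≤ N → ∀ (pre : List Char) (res : Int),
    (PySem.List.pyRange ((pre.length : Int) + 1) ((pre.length : Int) + (d.length : Int) - 1) 1).foldl
        pvStep1 (pre ++ d, res)
      = (pre ++ (pvBuild d).1, res + (pvBuild d).2) := by
  induction N with
  | zero =>
    intro d hd pre res
    have : d = [] := List.length_eq_zero_iff.mp (Nat.le_zero.mp hd)
    subst this
    rw [PySem.List.pyRange_one_eq_nil (by simp only [List.length_nil]; push_cast; omega)]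
    simp [pvBuild]
  | succ N ih =>
    intro d hd pre res
    match d with
    | [] =>
      rw [PySem.List.pyRange_one_eq_nil (by simp only [List.length_nil]; push_cast; omega)]; simp [pvBuild]
    | [c] =>
      rw [PySem.List.pyRange_one_eq_nil (by simp only [List.length_cons, List.length_nil]; push_cast; omega)]
      simp [pvBuild]
    | [c, c'] =>
      rw [PySem.List.pyRange_one_eq_nil (by simp only [List.length_cons, List.length_nil]; push_cast; omega)]
      simp [pvBuild]
    | c0 :: c1 :: c2 :: r =>
      rw [PySem.List.pyRange_one_cons (by simp only [List.length_cons]; push_cast; omega), List.foldl_cons]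
      have g0 := pvGetAt pre (c0 :: c1 :: c2 :: r) 0 ((pre.length : Int) + 1 - 1) (by push_cast; ring)
      have g1 := pvGetAt pre (c0 :: c1 :: c2 :: r) 1 ((pre.length : Int) + 1) (by push_cast; ring)
      have g2 := pvGetAt pre (c0 :: c1 :: c2 :: r) 2 ((pre.length : Int) + 1 + 1) (by push_cast; ring)
      by_cases hm : c0 = 'H' ∧ c1 = '.' ∧ c2 = 'H'
      · obtain ⟨h0, h1, h2⟩ := hm
        subst h0; subst h1; subst h2
        have step : pvStep1 (pre ++ 'H' :: '.' :: 'H' :: r, res) ((pre.length : Int) + 1)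
            = (pre ++ '?' :: '?' :: '?' :: r, res + 1) := by
          unfold pvStep1
          dsimp only
          rw [g1, g0, g2]
          rw [if_neg (by simp [List.getD])]
          rw [if_pos (by simp [List.getD])]
          rw [pvSetAt pre _ 0 _ (by push_cast; ring)]
          simp only [List.set]
          rw [pvSetAt pre _ 1 _ (by push_cast; ring)]
          simp only [List.set]
          rw [pvSetAt pre _ 2 _ (by push_cast; ring)]
          simp [List.set]
        rw [step]
        have ihh := ih ('?' :: '?' :: r) (by simp only [List.length_cons] at hd ⊢; omega) (pre ++ ['?']) (res + 1)
        have ea : (pre ++ ['?']) ++ '?' :: '?' :: r = pre ++ '?' :: '?' :: '?' :: r := by simp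
        rw [ea] at ihh
        have eL : ((pre ++ ['?']).length : Int) + 1 = (pre.length : Int) + 1 + 1 := by simp
        have eU : ((pre ++ ['?']).length : Int) + ((('?' :: '?' :: r).length : Int)) - 1
            = (pre.length : Int) + (((('H' : Char) :: '.' :: 'H' :: r).length : Int)) - 1 := by
          simp only [List.length_append, List.length_cons, List.length_nil]; push_cast; omega
        rw [eL, eU] at ihh
        rw [ihh, pvBuild_match, pvBuild_cons_ne '?' (by decide), pvBuild_cons_ne '?' (by decide)]
        rw [Prod.ext_iff]
        exact ⟨by simp, by dsimp only; omega⟩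
      · have step : pvStep1 (pre ++ c0 :: c1 :: c2 :: r, res) ((pre.length : Int) + 1)
            = (pre ++ c0 :: c1 :: c2 :: r, res) := by
          unfold pvStep1
          dsimp only
          rw [g1, g0, g2]
          by_cases h1 : c1 = '.'
          · rw [if_neg (by simp [List.getD, h1])]
            rw [if_neg (by simp only [List.getD]; simp; intro ha hb; exact hm ⟨ha, h1, hb⟩)]
          · rw [if_pos (by simp [List.getD, h1])]
        rw [step]
        have ihh := ih (c1 :: c2 :: r) (by simp only [List.length_cons] at hd ⊢; omega) (pre ++ [c0]) res
        have ea : (pre ++ [c0]) ++ c1 :: c2 :: r = pre ++ c0 :: c1 :: c2 :: r := by simp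
        rw [ea] at ihh
        have eL : ((pre ++ [c0]).length : Int) + 1 = (pre.length : Int) + 1 + 1 := by simp
        have eU : ((pre ++ [c0]).length : Int) + (((c1 :: c2 :: r).length : Int)) - 1
            = (pre.length : Int) + (((c0 :: c1 :: c2 :: r).length : Int)) - 1 := by
          simp only [List.length_append, List.length_cons, List.length_nil]; push_cast; omega
        rw [eL, eU] at ihh
        rw [ihh, pvBuild_nomatch c0 c1 c2 r hm]
        simp

def pvMarkHead : List Char → List Char
  | [] => []
  | c :: t => if c = 'H' then '?' :: t else c :: t

lemma pvMarkHead_length (l : List Char) : (pvMarkHead l).length = l.length := by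
  cases l with
  | nil => rfl
  | cons c t => simp only [pvMarkHead]; split <;> simp

def pvWC : List Char → List Char × Int
  | [] => ([], 0)
  | [p] => ([p], 0)
  | p :: c :: cs =>
    if c = '.' then
      let a : Int := if cs.head? = some 'H' then 1 else 0
      let rec1 := pvWC ('.' :: pvMarkHead cs)
      ((if p = 'H' then '?' else p) :: rec1.1, a + (if p = 'H' then 1 else 0) + rec1.2)
    else
      let rec1 := pvWC (c :: cs)
      (p :: rec1.1, rec1.2)
termination_by l => l.length
decreasing_by all_goals simp [pvMarkHead_length]

lemma pvWC_dot (p : Char) (cs : List Char) :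
    pvWC (p :: '.' :: cs)
      = ((if p = 'H' then '?' else p) :: (pvWC ('.' :: pvMarkHead cs)).1,
         (if cs.head? = some 'H' then (1 : Int) else 0) + (if p = 'H' then (1 : Int) else 0)
           + (pvWC ('.' :: pvMarkHead cs)).2) := by
  rw [pvWC]; simp

lemma pvWC_ne (p c : Char) (hc : c ≠ '.') (cs : List Char) :
    pvWC (p :: c :: cs) = (p :: (pvWC (c :: cs)).1, (pvWC (c :: cs)).2) := by
  rw [pvWC, if_neg hc]

lemma pass2_fold (N : Nat) : ∀ (d : List Char), d.length ≤ N → d ≠ [] →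
    ∀ (pre : List Char) (res : Int),
    (PySem.List.pyRange ((pre.length : Int) + 1) ((pre.length : Int) + (d.length : Int)) 1).foldl
        (pvStep2 ((pre.length : Int) + (d.length : Int))) (pre ++ d, res)
      = (pre ++ (pvWC d).1, res + (pvWC d).2) := by
  induction N with
  | zero =>
    intro d hd hne
    exact absurd (List.length_eq_zero_iff.mp (Nat.le_zero.mp hd)) hne
  | succ N ih =>
    intro d hd hne pre res
    match d with
    | [p] =>
      rw [PySem.List.pyRange_one_eq_nil (by simp only [List.length_cons, List.length_nil]; push_cast; omega)]
      simp [pvWC]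
    | p :: c :: cs =>
      rw [PySem.List.pyRange_one_cons (by simp only [List.length_cons]; push_cast; omega), List.foldl_cons]
      have g0 := pvGetAt pre (p :: c :: cs) 0 ((pre.length : Int) + 1 - 1) (by push_cast; ring)
      have g1 := pvGetAt pre (p :: c :: cs) 1 ((pre.length : Int) + 1) (by push_cast; ring)
      have g2 := pvGetAt pre (p :: c :: cs) 2 ((pre.length : Int) + 1 + 1) (by push_cast; ring)
      by_cases hc : c = '.'
      · subst hc
        have hstep : pvStep2 ((pre.length : Int) + (((p :: '.' :: cs).length : Int)))
              (pre ++ p :: '.' :: cs, res) ((pre.length : Int) + 1)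
            = (pre ++ ((if p = 'H' then '?' else p) :: '.' :: pvMarkHead cs),
               res + (if cs.head? = some 'H' then 1 else 0) + (if p = 'H' then 1 else 0)) := by
          unfold pvStep2
          dsimp only
          rw [g1]
          rw [if_neg (show ¬(List.getD (p :: '.' :: cs) 1 ' ' ≠ '.') from by simp [List.getD])]
          rw [g2]
          cases cs with
          | nil =>
            rw [if_neg (show ¬(((pre.length : Int) + 1 + 1 < (pre.length : Int) + (((p :: '.' :: ([] : List Char)).length : Int))) ∧ List.getD (p :: '.' :: ([] : List Char)) 2 ' ' = 'H') from by
              rintro ⟨h2, -⟩; simp only [List.length_cons, List.length_nil] at h2; push_cast at h2; omega)]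
            dsimp only
            rw [g0]
            by_cases hp : p = 'H'
            · subst hp
              rw [if_pos (show ((0 : Int) ≤ (pre.length : Int) + 1 - 1 ∧ List.getD (('H' : Char) :: '.' :: ([] : List Char)) 0 ' ' = 'H') from ⟨by omega, by simp [List.getD]⟩)]
              rw [pvSetAt pre _ 0 _ (by push_cast; ring)]
              rw [Prod.ext_iff]
              exact ⟨by simp [List.set, pvMarkHead], by simp [pvMarkHead]⟩
            · rw [if_neg (show ¬((0 : Int) ≤ (pre.length : Int) + 1 - 1 ∧ List.getD (p :: '.' :: ([] : List Char)) 0 ' ' = 'H') from by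
                rintro ⟨-, hB⟩; simp [List.getD] at hB; exact hp hB)]
              rw [Prod.ext_iff]
              exact ⟨by simp [pvMarkHead, hp], by simp [pvMarkHead, hp]⟩
          | cons c2 cs2 =>
            by_cases h2 : c2 = 'H'
            · subst h2
              rw [if_pos (show (((pre.length : Int) + 1 + 1 < (pre.length : Int) + (((p :: '.' :: ('H' : Char) :: cs2).length : Int))) ∧ List.getD (p :: '.' :: ('H' : Char) :: cs2) 2 ' ' = 'H') from
                ⟨by simp only [List.length_cons]; push_cast; omega, by simp [List.getD]⟩)]
              dsimp only
              rw [pvSetAt pre _ 2 _ (by push_cast; ring)]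
              simp only [List.set]
              have g0' := pvGetAt pre (p :: '.' :: '?' :: cs2) 0 ((pre.length : Int) + 1 - 1) (by push_cast; ring)
              rw [g0']
              by_cases hp : p = 'H'
              · subst hp
                rw [if_pos (show ((0 : Int) ≤ (pre.length : Int) + 1 - 1 ∧ List.getD (('H' : Char) :: '.' :: '?' :: cs2) 0 ' ' = 'H') from ⟨by omega, by simp [List.getD]⟩)]
                rw [pvSetAt pre _ 0 _ (by push_cast; ring)]
                rw [Prod.ext_iff]
                exact ⟨by simp [List.set, pvMarkHead], by simp [pvMarkHead]⟩
              · rw [if_neg (show ¬((0 : Int) ≤ (pre.length : Int) + 1 - 1 ∧ List.getD (p :: '.' :: '?' :: cs2) 0 ' ' = 'H') from by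
                  rintro ⟨-, hB⟩; simp [List.getD] at hB; exact hp hB)]
                rw [Prod.ext_iff]
                exact ⟨by simp [pvMarkHead, hp], by simp [hp]⟩
            · rw [if_neg (show ¬(((pre.length : Int) + 1 + 1 < (pre.length : Int) + (((p :: '.' :: c2 :: cs2).length : Int))) ∧ List.getD (p :: '.' :: c2 :: cs2) 2 ' ' = 'H') from by
                rintro ⟨-, hB⟩; simp [List.getD] at hB; exact h2 hB)]
              dsimp only
              rw [g0]
              by_cases hp : p = 'H'
              · subst hp
                rw [if_pos (show ((0 : Int) ≤ (pre.length : Int) + 1 - 1 ∧ List.getD (('H' : Char) :: '.' :: c2 :: cs2) 0 ' ' = 'H') from ⟨by omega, by simp [List.getD]⟩)]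
                rw [pvSetAt pre _ 0 _ (by push_cast; ring)]
                rw [Prod.ext_iff]
                exact ⟨by simp [List.set, pvMarkHead, h2], by simp [pvMarkHead, h2]⟩
              · rw [if_neg (show ¬((0 : Int) ≤ (pre.length : Int) + 1 - 1 ∧ List.getD (p :: '.' :: c2 :: cs2) 0 ' ' = 'H') from by
                  rintro ⟨-, hB⟩; simp [List.getD] at hB; exact hp hB)]
                rw [Prod.ext_iff]
                exact ⟨by simp [pvMarkHead, hp, h2], by simp [pvMarkHead, hp, h2]⟩
        rw [hstep]
        have ihh := ih ('.' :: pvMarkHead cs) (by simp only [List.length_cons, pvMarkHead_length] at hd ⊢; omega)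
          (by simp) (pre ++ [if p = 'H' then '?' else p]) (res + (if cs.head? = some 'H' then 1 else 0) + (if p = 'H' then 1 else 0))
        have ea : (pre ++ [if p = 'H' then '?' else p]) ++ '.' :: pvMarkHead cs
            = pre ++ ((if p = 'H' then '?' else p) :: '.' :: pvMarkHead cs) := by simp
        rw [ea] at ihh
        have eL : (((pre ++ [if p = 'H' then '?' else p]).length : Int) + 1) = (pre.length : Int) + 1 + 1 := by simp
        have eU : (((pre ++ [if p = 'H' then '?' else p]).length : Int) + ((('.' :: pvMarkHead cs).length : Int)))
            = (pre.length : Int) + (((p :: '.' :: cs).length : Int)) := by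
          simp only [List.length_append, List.length_cons, List.length_nil, pvMarkHead_length]; push_cast; omega
        rw [eL, eU] at ihh
        rw [ihh, pvWC_dot]
        rw [Prod.ext_iff]
        exact ⟨by simp, by dsimp only; omega⟩
      · have step : pvStep2 ((pre.length : Int) + (((p :: c :: cs).length : Int)))
              (pre ++ p :: c :: cs, res) ((pre.length : Int) + 1) = (pre ++ p :: c :: cs, res) := by
          unfold pvStep2
          dsimp only
          rw [g1]
          rw [if_pos (by simp [List.getD, hc])]
        rw [step]
        have ihh := ih (c :: cs) (by simp only [List.length_cons] at hd ⊢; omega) (by simp) (pre ++ [p]) res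
        have ea : (pre ++ [p]) ++ c :: cs = pre ++ p :: c :: cs := by simp
        rw [ea] at ihh
        have eL : ((pre ++ [p]).length : Int) + 1 = (pre.length : Int) + 1 + 1 := by simp
        have eU : ((pre ++ [p]).length : Int) + (((c :: cs).length : Int))
            = (pre.length : Int) + (((p :: c :: cs).length : Int)) := by
          simp only [List.length_append, List.length_cons, List.length_nil]; push_cast; omega
        rw [eL, eU] at ihh
        rw [ihh, pvWC_ne p c hc cs]
        simp

lemma pvMarkHead_head_ne (l : List Char) : (pvMarkHead l).head? ≠ some 'H' := by
  cases l with
  | nil => simp [pvMarkHead]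
  | cons c t =>
    simp only [pvMarkHead]
    split
    · simp
    · next h => simp [h]

lemma pvWC_dot_H (cs : List Char) :
    pvWC ('H' :: '.' :: cs)
      = ('?' :: (pvWC ('.' :: pvMarkHead cs)).1,
         (if cs.head? = some 'H' then (1 : Int) else 0) + 1 + (pvWC ('.' :: pvMarkHead cs)).2) := by
  rw [pvWC_dot]; simp

lemma pvWC_dot_ne (p : Char) (hp : p ≠ 'H') (cs : List Char) :
    pvWC (p :: '.' :: cs)
      = (p :: (pvWC ('.' :: pvMarkHead cs)).1,
         (if cs.head? = some 'H' then (1 : Int) else 0) + (pvWC ('.' :: pvMarkHead cs)).2) := by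
  rw [pvWC_dot]; simp [hp]

lemma pvCharge_congr (L : List Char) (q q' : Char) (h : q = '.' ↔ q' = '.') (res : Int) :
    pvCharge q res L = pvCharge q' res L := by
  cases L with
  | nil => rfl
  | cons c cs =>
    simp only [pvCharge]
    by_cases hc : c = 'H'
    · rw [if_pos hc, if_pos hc, if_congr (by rw [h]) rfl rfl]
    · rw [if_neg hc, if_neg hc]

lemma pvFinish (cs : List Char) (r : Int) :
    pvCharge '.' (r + (if cs.head? = some 'H' then 1 else 0)) (pvMarkHead cs) = pvCharge '.' r cs := by
  cases cs with
  | nil => simp [pvMarkHead]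
  | cons c3 cs3 =>
    by_cases h3 : c3 = 'H'
    · subst h3
      have e1 : pvMarkHead ('H' :: cs3) = '?' :: cs3 := by simp [pvMarkHead]
      have e2 : (if (('H' : Char) :: cs3).head? = some 'H' then (1 : Int) else 0) = 1 := by simp
      rw [e1, e2]
      simp only [pvCharge]
      simp
      exact pvCharge_congr cs3 '?' 'H' (by decide) (r + 1)
    · simp only [pvMarkHead, if_neg h3, List.head?_cons]
      simp [h3]

lemma pvMaster (N : Nat) : ∀ (m : Nat), m ≤ N →
    ((∀ (L : List Char) (p q : Char) (res : Int), L.length = m → p ≠ 'H' → (p = '.' ↔ q = '.') →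
        (p = '.' → L.head? ≠ some 'H') →
        pvPass3 (res + (pvWC (p :: L)).2) ((pvWC (p :: L)).1) = pvCharge q res L)
     ∧ (∀ (cs : List Char) (q : Char) (res : Int), cs.length + 1 = m → q ≠ '.' →
        pvPass3 (res + (pvWC ('H' :: cs)).2) ((pvWC ('H' :: cs)).1) = pvCharge q res ('H' :: cs))) := by
  induction N with
  | zero =>
    intro m hm
    constructor
    · intro L p q res hlen hp hiff hdot
      have : L = [] := List.length_eq_zero_iff.mp (by omega)
      subst this
      simp [pvWC, pvPass3, pvCharge, hp]
    · intro cs q res hlen hq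
      omega
  | succ N ih =>
    intro m hm
    by_cases hmN : m ≤ N
    · exact ih m hmN
    · have hmE : m = N + 1 := by omega
      have third : ∀ (cs : List Char) (r : Int), cs.length ≤ N →
          pvPass3 (r + (if cs.head? = some 'H' then 1 else 0) + (pvWC ('.' :: pvMarkHead cs)).2)
              ((pvWC ('.' :: pvMarkHead cs)).1) = pvCharge '.' r cs := by
        intro cs r hcs
        have ihp := (ih cs.length hcs).1 (pvMarkHead cs) '.' '.'
          (r + (if cs.head? = some 'H' then 1 else 0)) (pvMarkHead_length cs) (by decide) Iff.rfl
          (fun _ => pvMarkHead_head_ne cs)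
        rw [ihp]
        exact pvFinish cs r
      have part2 : (∀ (cs : List Char) (q : Char) (res : Int), cs.length + 1 = m → q ≠ '.' →
          pvPass3 (res + (pvWC ('H' :: cs)).2) ((pvWC ('H' :: cs)).1) = pvCharge q res ('H' :: cs)) := by
        intro cs q res hlen hq
        match cs with
        | [] =>
          simp [pvWC, pvPass3, pvCharge, hq]
        | c2 :: cs2 =>
          by_cases h2 : c2 = '.'
          · subst h2
            rw [pvWC_dot_H cs2]
            dsimp only
            simp only [pvPass3]
            rw [if_neg (show ¬(('?' : Char) = 'H') from by decide)]
            have e : res + ((if cs2.head? = some 'H' then (1 : Int) else 0) + 1 + (pvWC ('.' :: pvMarkHead cs2)).2)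
                = res + 1 + (if cs2.head? = some 'H' then (1 : Int) else 0) + (pvWC ('.' :: pvMarkHead cs2)).2 := by
              omega
            rw [e, third cs2 (res + 1) (by simp only [List.length_cons] at hlen; omega)]
            simp [pvCharge]
          · rw [pvWC_ne 'H' c2 h2 cs2]
            simp [pvPass3, pvCharge, hq, h2]
      refine ⟨?_, part2⟩
      intro L p q res hlen hp hiff hdot
      match L with
      | [] => simp [pvWC, pvPass3, pvCharge, hp]
      | c :: cs =>
        by_cases hcH : c = 'H'
        · subst hcH
          have hq : q ≠ '.' := fun h => hdot (hiff.mpr h) (by simp)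
          rw [pvWC_ne p 'H' (by decide) cs]
          dsimp only
          simp only [pvPass3]
          rw [if_neg hp]
          exact part2 cs q res (by simp only [List.length_cons] at hlen; omega) hq
        · by_cases hcD : c = '.'
          · subst hcD
            rw [pvWC_dot_ne p hp cs]
            dsimp only
            simp only [pvPass3]
            rw [if_neg hp]
            have e : res + ((if cs.head? = some 'H' then (1 : Int) else 0) + (pvWC ('.' :: pvMarkHead cs)).2)
                = res + (if cs.head? = some 'H' then (1 : Int) else 0) + (pvWC ('.' :: pvMarkHead cs)).2 := by
              omega
            rw [e, third cs res (by simp only [List.length_cons] at hlen; omega)]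
            simp [pvCharge]
          · rw [pvWC_ne p c hcD cs]
            dsimp only
            simp only [pvPass3]
            rw [if_neg hp]
            have ihp := (ih cs.length (by simp only [List.length_cons] at hlen; omega)).1 cs c c res rfl hcH Iff.rfl
              (fun h => absurd h hcD)
            rw [ihp]
            simp [pvCharge, hcH]

lemma pvBuild_length (l : List Char) : (pvBuild l).1.length = l.length := by
  induction l using pvBuild.induct with
  | case1 => simp [pvBuild]
  | case2 => simp [pvBuild]
  | case3 => simp [pvBuild]
  | case4 c d e r h ihr =>
    rw [pvBuild]
    rw [if_pos h]
    simpa using ihr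
  | case5 c d e r h ihr =>
    rw [pvBuild]
    rw [if_neg h]
    simpa using ihr

lemma pvMaster1 (L : List Char) (p q : Char) (res : Int) (hp : p ≠ 'H') (hiff : p = '.' ↔ q = '.')
    (hdot : p = '.' → L.head? ≠ some 'H') :
    pvPass3 (res + (pvWC (p :: L)).2) ((pvWC (p :: L)).1) = pvCharge q res L :=
  (pvMaster L.length L.length le_rfl).1 L p q res rfl hp hiff hdot

lemma pvMaster2 (cs : List Char) (q : Char) (res : Int) (hq : q ≠ '.') :
    pvPass3 (res + (pvWC ('H' :: cs)).2) ((pvWC ('H' :: cs)).1) = pvCharge q res ('H' :: cs) :=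
  (pvMaster (cs.length + 1) (cs.length + 1) le_rfl).2 cs q res rfl hq

lemma pvThird (cs : List Char) (r : Int) :
    pvPass3 (r + (if cs.head? = some 'H' then 1 else 0) + (pvWC ('.' :: pvMarkHead cs)).2)
        ((pvWC ('.' :: pvMarkHead cs)).1) = pvCharge '.' r cs := by
  rw [pvMaster1 (pvMarkHead cs) '.' '.' (r + (if cs.head? = some 'H' then 1 else 0)) (by decide)
    Iff.rfl (fun _ => pvMarkHead_head_ne cs)]
  exact pvFinish cs r

lemma pvZeroStep (u : List Char) (r : Int) (hc0 : u.head? = some '.') :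
    ∀ (c0 : Char) (rest : List Char), u = c0 :: rest →
    pvStep2 ((u.length : Int)) (u, r) 0
      = ('.' :: pvMarkHead rest, r + (if rest.head? = some 'H' then 1 else 0)) := by
  intro c0 rest he
  subst he
  simp only [List.head?_cons, Option.some.injEq] at hc0
  subst hc0
  unfold pvStep2
  dsimp only
  rw [PySem.List.pyGetD_zero_cons]
  rw [if_neg (show ¬(('.' : Char) ≠ '.') from by simp)]
  simp only [show ((0 : Int) ≤ 0 - 1) = False from by norm_num, false_and, if_false]
  cases rest with
  | nil =>
    rw [if_neg (show ¬((0 : Int) + 1 < (((('.' : Char) :: ([] : List Char)).length : Int)) ∧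
        PySem.List.pyGetD (('.' : Char) :: ([] : List Char)) ((0 : Int) + 1) ' ' = 'H') from by
      rintro ⟨h, -⟩; norm_num at h)]
    simp [pvMarkHead]
  | cons c1 r1 =>
    by_cases h1 : c1 = 'H'
    · subst h1
      rw [if_pos (show ((0 : Int) + 1 < (((('.' : Char) :: ('H' : Char) :: r1).length : Int)) ∧
          PySem.List.pyGetD (('.' : Char) :: ('H' : Char) :: r1) ((0 : Int) + 1) ' ' = 'H') from
        ⟨by simp only [List.length_cons]; push_cast; omega,
         by rw [show ((0 : Int) + 1) = ((1 : Nat) : Int) from by norm_num, PySem.List.pyGetD_natCast]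
            simp [List.getD]⟩)]
      rw [show ((0 : Int) + 1) = ((1 : Nat) : Int) from by norm_num, PySem.List.pySetD_natCast]
      simp [List.set, pvMarkHead]
    · rw [if_neg (show ¬((0 : Int) + 1 < (((('.' : Char) :: c1 :: r1).length : Int)) ∧
          PySem.List.pyGetD (('.' : Char) :: c1 :: r1) ((0 : Int) + 1) ' ' = 'H') from by
        rintro ⟨-, h⟩
        rw [show ((0 : Int) + 1) = ((1 : Nat) : Int) from by norm_num, PySem.List.pyGetD_natCast] at h
        simp [List.getD] at h
        exact h1 h)]
      simp [pvMarkHead, h1]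

lemma pvNoDotStep (c0 : Char) (rest : List Char) (r : Int) (hc0 : c0 ≠ '.') :
    pvStep2 (((c0 :: rest).length : Int)) (c0 :: rest, r) 0 = (c0 :: rest, r) := by
  unfold pvStep2
  dsimp only
  rw [PySem.List.pyGetD_zero_cons]
  rw [if_pos hc0]

theorem pvBucketsEq (s : String) : minimumBuckets s = minimumBuckets_alt s := by
  unfold minimumBuckets minimumBuckets_alt
  dsimp only
  have h1 := pass1_fold (s.toList.length) s.toList le_rfl [] 0
  simp only [List.nil_append, List.length_nil, Nat.cast_zero, zero_add] at h1
  rw [h1]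
  rw [show ((s.toList.length : Int)) = (((pvBuild s.toList).1.length : Int)) from by rw [pvBuild_length]]
  generalize (pvBuild s.toList).1 = u
  generalize (pvBuild s.toList).2 = r
  cases u with
  | nil =>
    rw [PySem.List.pyRange_one_eq_nil (by simp)]
    rfl
  | cons c0 rest =>
    rw [PySem.List.pyRange_one_cons (by simp only [List.length_cons]; push_cast; omega), List.foldl_cons]
    by_cases hc0 : c0 = '.'
    · subst hc0
      rw [pvZeroStep ('.' :: rest) r (by simp) '.' rest rfl]
      have h2 := pass2_fold (1 + rest.length) ('.' :: pvMarkHead rest)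
        (by simp [pvMarkHead_length]) (by simp) [] (r + (if rest.head? = some 'H' then 1 else 0))
      simp only [List.nil_append, List.length_nil, Nat.cast_zero, zero_add] at h2
      rw [show ((((('.' : Char) :: rest).length : Nat) : Int)) = (((('.' : Char) :: pvMarkHead rest).length : Int)) from by
        simp [pvMarkHead_length]] at *
      rw [show ((0 : Int) + 1) = (1 : Int) from by norm_num, h2]
      dsimp only
      rw [show r + (if rest.head? = some 'H' then (1 : Int) else 0) + (pvWC ('.' :: pvMarkHead rest)).2
          = r + (if rest.head? = some 'H' then (1 : Int) else 0) + (pvWC ('.' :: pvMarkHead rest)).2 from rfl]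
      rw [pvThird rest r]
      simp [pvCharge]
    · rw [pvNoDotStep c0 rest r hc0]
      have h2 := pass2_fold (1 + rest.length) (c0 :: rest) (by simp) (by simp) [] r
      simp only [List.nil_append, List.length_nil, Nat.cast_zero, zero_add] at h2
      rw [show ((0 : Int) + 1) = (1 : Int) from by norm_num, h2]
      dsimp only
      by_cases hcH : c0 = 'H'
      · subst hcH
        rw [pvMaster2 rest '#' r (by decide)]
      · rw [pvMaster1 rest c0 c0 r hcH Iff.rfl (fun h => absurd h hc0)]
        simp [pvCharge, hcH]

-- ===== VERDICT (by name: the statement is the Claim_ definition above) =====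
theorem minimumBuckets_spec : Claim_equal_minimumBuckets := by
  intro s _
  unfold Spec_minimumBuckets
  exact pvBucketsEq s
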